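-- pv_equiv track=rewrite | github.com/suuujuuun/suuujuuun | LogicDiagram/parser.py | _split_expressions
-- ===== SOURCE A (Python) =====
-- def _split_expressions(expr):
--     expr = expr.replace("(", "( ").replace(")", " )")
--     tokens = expr.split()
--     stack = []
--     current = []
--
--     for token in tokens:
--         if token == "(":
--             stack.append(current)
--             current = []
--         elif token == ")":
--             group = current
--             current = stack.pop() if stack else []
--             current.append(group)
--         elif token in ("AND", "OR"):
--             current.append(token)
--         else:
--             current.append(token)
--
--     return _flatten_expression(current)
--
-- def _flatten_expression(expr):
--     if isinstance(expr, str):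
--         return [expr]
--
--     if isinstance(expr, list):
--         flat = []
--         for item in expr:
--             if item in ("AND", "OR"):
--                 continue  # operator ignored for simple edge generation
--             flat.extend(_flatten_expression(item))
--         return flat
--
--     return []
-- ===== SOURCE B (Python) =====
-- def _split_expressions(expr):
--     expr = expr.replace("(", "( ").replace(")", " )")
--     stack = []
--     current = []
--     for token in expr.split():
--         if token == "(":
--             stack.append(current)
--             current = []
--         elif token == ")":
--             group = current
--             current = stack.pop() if stack else []
--             current.extend(group)
--         elif token not in ("AND", "OR"):
--             current.append(token)
--     return current
-- ===== Notes on version B (the rewrite author's own statement) =====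
-- stated objective: simpler
-- what changed: B fuses the two-phase parse-then-recursive-flatten into one pass: it keeps a stack of flat string lists, skips AND/OR at append time and splices a closed group into its parent with extend, deleting the nested-list tree and the recursive _flatten_expression helper entirely.
import Mathlib
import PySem

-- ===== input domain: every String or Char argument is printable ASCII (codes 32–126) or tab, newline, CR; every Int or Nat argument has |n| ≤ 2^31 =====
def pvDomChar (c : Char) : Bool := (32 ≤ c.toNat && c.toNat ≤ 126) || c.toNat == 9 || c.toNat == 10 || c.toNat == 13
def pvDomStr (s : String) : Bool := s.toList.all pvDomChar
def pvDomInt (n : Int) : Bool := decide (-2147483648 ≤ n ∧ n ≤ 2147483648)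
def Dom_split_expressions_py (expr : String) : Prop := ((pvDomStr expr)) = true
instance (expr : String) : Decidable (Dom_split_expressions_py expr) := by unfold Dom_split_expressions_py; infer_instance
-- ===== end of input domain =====

-- B fuses A's parse-then-recursive-flatten into one pass over flat string lists (objective: simpler); proved equal on all inputs.


-- ===== PORT A =====
-- A's `current` is a Python list whose items are strings or nested lists; encoded as a
-- snoc list with a constructor per item kind (avoids a nested inductive).
inductive PyTree where
  | nil : PyTree                          -- []
  | str : PyTree → String → PyTree        -- xs + [token]
  | grp : PyTree → PyTree → PyTree        -- xs + [group]
deriving DecidableEq, Repr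

-- one iteration of A's token loop; state = (stack, current), stack head = Python stack top
def aStep (st : List PyTree × PyTree) (token : String) : List PyTree × PyTree :=
  if token = "(" then (st.2 :: st.1, PyTree.nil)
  else if token = ")" then
    match st.1 with
    | [] => ([], PyTree.grp PyTree.nil st.2)          -- current = []; current.append(group)
    | parent :: rest => (rest, PyTree.grp parent st.2) -- current = stack.pop(); current.append(group)
  else if token = "AND" ∨ token = "OR" then (st.1, PyTree.str st.2 token)
  else (st.1, PyTree.str st.2 token)

-- _flatten_expression applied to a list: left-to-right, operators skipped, lists recursed
-- (a list item never equals "AND"/"OR" in Python, so grp always recurses)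
def flattenL : PyTree → List String
  | PyTree.nil => []
  | PyTree.str rest s => flattenL rest ++ (if s = "AND" ∨ s = "OR" then [] else [s])
  | PyTree.grp rest g => flattenL rest ++ flattenL g

def split_expressions_py (expr : String) : List String :=
  let tokens := PySem.Str.split₀ (PySem.Str.replace (PySem.Str.replace expr "(" "( ") ")" " )")
  flattenL (tokens.foldl aStep ([], PyTree.nil)).2

-- ===== PORT B =====
-- one iteration of B's loop; state = (stack of flat lists, current flat list)
def bStep (st : List (List String) × List String) (token : String) : List (List String) × List String :=
  if token = "(" then (st.2 :: st.1, [])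
  else if token = ")" then
    match st.1 with
    | [] => ([], st.2)                        -- ([] if empty) .extend(group)
    | parent :: rest => (rest, parent ++ st.2) -- stack.pop().extend(group)
  else if ¬ (token = "AND" ∨ token = "OR") then (st.1, st.2 ++ [token])
  else (st.1, st.2)

def split_expressions_py_alt (expr : String) : List String :=
  let tokens := PySem.Str.split₀ (PySem.Str.replace (PySem.Str.replace expr "(" "( ") ")" " )")
  (tokens.foldl bStep ([], [])).2

-- ===== PRECONDITION & SPEC =====
def Spec_split_expressions_py (expr : String) (out : List String) : Prop := out = split_expressions_py_alt expr
instance (expr : String) (out : List String) : Decidable (Spec_split_expressions_py expr out) := by unfold Spec_split_expressions_py; infer_instance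

-- ===== CLAIM (what is proved, stated in full; the proofs are below) =====
def Claim_equal_split_expressions_py : Prop := ∀ (expr : String), Dom_split_expressions_py expr → Spec_split_expressions_py expr (split_expressions_py expr)

-- ===== LEMMAS AND PROOFS =====
-- abstraction from A's state to B's state
def absSt (st : List PyTree × PyTree) : List (List String) × List String :=
  (st.1.map flattenL, flattenL st.2)

theorem absSt_step (st : List PyTree × PyTree) (t : String) :
    absSt (aStep st t) = bStep (absSt st) t := by
  obtain ⟨stack, cur⟩ := st
  unfold aStep bStep absSt
  by_cases h1 : t = "("
  · simp [h1, flattenL]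
  · by_cases h2 : t = ")"
    · cases stack <;> simp [h2, flattenL]
    · by_cases h3 : t = "AND" ∨ t = "OR" <;> simp [h1, h2, h3, flattenL]

theorem absSt_foldl (ts : List String) (st : List PyTree × PyTree) :
    absSt (ts.foldl aStep st) = ts.foldl bStep (absSt st) := by
  induction ts generalizing st with
  | nil => rfl
  | cons t ts ih => simp [List.foldl, ih, absSt_step]

-- ===== VERDICT (by name: the statement is the Claim_ definition above) =====
theorem split_expressions_py_spec : Claim_equal_split_expressions_py := by
  intro expr _
  unfold Spec_split_expressions_py split_expressions_py split_expressions_py_alt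
  have h := absSt_foldl
    (PySem.Str.split₀ (PySem.Str.replace (PySem.Str.replace expr "(" "( ") ")" " )"))
    ([], PyTree.nil)
  have : (absSt (([], PyTree.nil) : List PyTree × PyTree)) = ([], []) := rfl
  rw [this] at h
  simpa [absSt] using congrArg Prod.snd h
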